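-- pv_equiv track=rewrite | github.com/pypi-data/pypi-mirror-390 | packages/derip2/derip2-0.4.1.tar.gz/derip2-0.4.1/src/derip2/derip.py | calculate_dinucleotide_frequency
-- ===== SOURCE A (Python) =====
-- def calculate_dinucleotide_frequency(sequence):
--     """
--     Calculate the frequency of specific dinucleotides in a sequence.
--
--     Parameters
--     ----------
--     sequence : str
--         The DNA sequence to analyze.
--
--     Returns
--     -------
--     dict
--         A dictionary with dinucleotide counts.
--     """
--     # Convert to uppercase and remove gaps
--     seq = sequence.upper().replace('-', '')
--
--     # Count dinucleotides
--     dinucleotides = {'TpA': 0, 'ApT': 0, 'CpA': 0, 'TpG': 0, 'ApC': 0, 'GpT': 0}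
--
--     for i in range(len(seq) - 1):
--         di = seq[i : i + 2]
--         if di == 'TA':
--             dinucleotides['TpA'] += 1
--         elif di == 'AT':
--             dinucleotides['ApT'] += 1
--         elif di == 'CA':
--             dinucleotides['CpA'] += 1
--         elif di == 'TG':
--             dinucleotides['TpG'] += 1
--         elif di == 'AC':
--             dinucleotides['ApC'] += 1
--         elif di == 'GT':
--             dinucleotides['GpT'] += 1
--
--     return dinucleotides
-- ===== SOURCE B (Python) =====
-- def calculate_dinucleotide_frequency(sequence):
--     """Same result as A: count the six dinucleotides via a zipped pair list
--     queried with list.count, instead of an index loop with an if-chain."""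
--     seq = sequence.upper().replace('-', '')
--     pairs = list(zip(seq, seq[1:]))
--     return {
--         'TpA': pairs.count(('T', 'A')),
--         'ApT': pairs.count(('A', 'T')),
--         'CpA': pairs.count(('C', 'A')),
--         'TpG': pairs.count(('T', 'G')),
--         'ApC': pairs.count(('A', 'C')),
--         'GpT': pairs.count(('G', 'T')),
--     }
-- ===== Notes on version B (the rewrite author's own statement) =====
-- stated objective: simpler
-- what changed: Replaces the index loop with per-position if/elif dispatch into a mutated dict by zipping the sequence with its tail and building the result dict directly from six list.count queries (no index arithmetic, no conditionals, no mutation).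
import Mathlib
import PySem

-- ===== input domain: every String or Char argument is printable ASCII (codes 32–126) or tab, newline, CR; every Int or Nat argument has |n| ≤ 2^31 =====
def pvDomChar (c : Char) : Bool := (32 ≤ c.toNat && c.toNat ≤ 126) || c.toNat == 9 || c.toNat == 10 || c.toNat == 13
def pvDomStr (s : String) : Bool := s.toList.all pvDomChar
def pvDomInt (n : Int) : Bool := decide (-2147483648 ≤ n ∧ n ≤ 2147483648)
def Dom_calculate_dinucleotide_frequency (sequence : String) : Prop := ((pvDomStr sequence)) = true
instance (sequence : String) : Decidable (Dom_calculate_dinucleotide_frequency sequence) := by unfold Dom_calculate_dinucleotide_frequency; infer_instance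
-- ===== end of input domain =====

-- B builds the dict directly from six list.count queries over the zipped pair list; A scans by index with an if/elif chain into a mutated dict. Same O(n) cost; B is shorter.

-- ===== PORT A =====
def calculate_dinucleotide_frequency (sequence : String) : List (String × Int) :=
  let seq := PySem.Chars.replace (PySem.Chars.upper sequence.toList) "-".toList "".toList
  let d0 : PySem.Dict String Int :=
    PySem.Dict.ofList [("TpA", 0), ("ApT", 0), ("CpA", 0), ("TpG", 0), ("ApC", 0), ("GpT", 0)]
  let d := (PySem.List.pyRange 0 ((seq.length : Int) - 1) 1).foldl (fun d i =>
    let di := PySem.List.slice seq (some i) (some (i + 2))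
    if di = "TA".toList then d.insert "TpA" (d.getD "TpA" 0 + 1)
    else if di = "AT".toList then d.insert "ApT" (d.getD "ApT" 0 + 1)
    else if di = "CA".toList then d.insert "CpA" (d.getD "CpA" 0 + 1)
    else if di = "TG".toList then d.insert "TpG" (d.getD "TpG" 0 + 1)
    else if di = "AC".toList then d.insert "ApC" (d.getD "ApC" 0 + 1)
    else if di = "GT".toList then d.insert "GpT" (d.getD "GpT" 0 + 1)
    else d) d0
  d.items

-- ===== PORT B =====
def calculate_dinucleotide_frequency_alt (sequence : String) : List (String × Int) :=
  let seq := PySem.Chars.replace (PySem.Chars.upper sequence.toList) "-".toList "".toList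
  let pairs := seq.zip (PySem.List.slice seq (some 1) none)
  [("TpA", (PySem.List.count pairs ('T', 'A') : Int)),
   ("ApT", (PySem.List.count pairs ('A', 'T') : Int)),
   ("CpA", (PySem.List.count pairs ('C', 'A') : Int)),
   ("TpG", (PySem.List.count pairs ('T', 'G') : Int)),
   ("ApC", (PySem.List.count pairs ('A', 'C') : Int)),
   ("GpT", (PySem.List.count pairs ('G', 'T') : Int))]

-- ===== PRECONDITION & SPEC =====
def Spec_calculate_dinucleotide_frequency (sequence : String) (out : List (String × Int)) : Prop := out = calculate_dinucleotide_frequency_alt sequence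
instance (sequence : String) (out : List (String × Int)) : Decidable (Spec_calculate_dinucleotide_frequency sequence out) := by unfold Spec_calculate_dinucleotide_frequency; infer_instance

-- ===== CLAIM (what is proved, stated in full; the proofs are below) =====
def Claim_equal_calculate_dinucleotide_frequency : Prop := ∀ (sequence : String), Dom_calculate_dinucleotide_frequency sequence → Spec_calculate_dinucleotide_frequency sequence (calculate_dinucleotide_frequency sequence)


-- ===== LEMMAS AND PROOFS =====
set_option maxHeartbeats 1000000

-- A's loop body, factored for the proofs (defeq to the lambda in port A)
def pvBody (d : PySem.Dict String Int) (di : List Char) : PySem.Dict String Int :=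
  if di = ['T', 'A'] then d.insert "TpA" (d.getD "TpA" 0 + 1)
  else if di = ['A', 'T'] then d.insert "ApT" (d.getD "ApT" 0 + 1)
  else if di = ['C', 'A'] then d.insert "CpA" (d.getD "CpA" 0 + 1)
  else if di = ['T', 'G'] then d.insert "TpG" (d.getD "TpG" 0 + 1)
  else if di = ['A', 'C'] then d.insert "ApC" (d.getD "ApC" 0 + 1)
  else if di = ['G', 'T'] then d.insert "GpT" (d.getD "GpT" 0 + 1)
  else d

theorem pv_aux {d : Type} (body : d -> List Char -> d) :
    forall (cs : List Char) (s : d),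
      (List.range (cs.length - 1)).foldl (fun s k => body s ((cs.drop k).take 2)) s
        = (cs.zip cs.tail).foldl (fun s p => body s [p.1, p.2]) s := by
  intro cs
  induction cs with
  | nil => intro s; simp
  | cons x t ih =>
    cases t with
    | nil => intro s; simp
    | cons y r =>
      intro s
      have h1 : (x :: y :: r).length - 1 = r.length + 1 := by simp
      rw [h1, List.range_succ_eq_map]
      simp only [List.foldl_cons, List.foldl_map, List.drop_succ_cons, List.drop_zero,
        List.zip_cons_cons, List.tail_cons, List.take_succ_cons, List.take_zero]
      have h2 : (y :: r).length - 1 = r.length := by simp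
      have := ih (body s [x, y])
      rw [h2] at this
      simpa using this

theorem pv_range_to_zip {d : Type} (body : d -> List Char -> d) (cs : List Char) (s : d) :
    (PySem.List.pyRange 0 ((cs.length : Int) - 1) 1).foldl
        (fun s i => body s (PySem.List.slice cs (some i) (some (i + 2)))) s
      = (cs.zip cs.tail).foldl (fun s p => body s [p.1, p.2]) s := by
  rw [PySem.List.pyRange_one]
  rw [List.foldl_map]
  have hsl : (fun (s : d) (k : Nat) => body s (PySem.List.slice cs (some ((0:Int) + (k:Int))) (some ((0:Int) + (k:Int) + 2))))
      = fun (s : d) (k : Nat) => body s ((cs.drop k).take 2) := by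
    funext s k
    rw [show ((0:Int) + (k:Int)) = ((k : Nat) : Int) from by ring,
        show (((k:Nat) : Int) + 2) = (((k + 2 : Nat)) : Int) from by push_cast; ring,
        PySem.List.slice_natCast, Nat.add_sub_cancel_left]
  rw [hsl]
  rw [show (((cs.length : Int) - 1 - 0)).toNat = cs.length - 1 from by omega]
  exact pv_aux body cs s

theorem pv_items : forall (l : List (Char × Char)) (a b c e f g : Int),
    ((l.foldl (fun s p => pvBody s [p.1, p.2]) (PySem.Dict.mk [("TpA", a), ("ApT", b), ("CpA", c), ("TpG", e), ("ApC", f), ("GpT", g)])).items)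
      = [("TpA", a + (l.count ('T','A') : Int)), ("ApT", b + (l.count ('A','T') : Int)),
         ("CpA", c + (l.count ('C','A') : Int)), ("TpG", e + (l.count ('T','G') : Int)),
         ("ApC", f + (l.count ('A','C') : Int)), ("GpT", g + (l.count ('G','T') : Int))] := by
  have hstep : forall (D : PySem.Dict String Int) (u v : Char) (l : List (Char × Char)),
      List.foldl (fun s p => pvBody s [p.1, p.2]) D ((u, v) :: l)
        = List.foldl (fun s p => pvBody s [p.1, p.2]) (pvBody D [u, v]) l := fun _ _ _ _ => rfl
  intro l
  induction l with
  | nil => intro a b c e f g; simp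
  | cons p l ih =>
    obtain ⟨u, v⟩ := p
    intro a b c e f g
    rw [hstep]
    by_cases h1 : u = 'T' ∧ v = 'A'
    · obtain ⟨rfl, rfl⟩ := h1
      rw [show pvBody (PySem.Dict.mk [("TpA", a), ("ApT", b), ("CpA", c), ("TpG", e), ("ApC", f), ("GpT", g)]) ['T', 'A']
            = PySem.Dict.mk [("TpA", a + 1), ("ApT", b), ("CpA", c), ("TpG", e), ("ApC", f), ("GpT", g)] from rfl, ih]
      simp
      try omega
    · by_cases h2 : u = 'A' ∧ v = 'T'
      · obtain ⟨rfl, rfl⟩ := h2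
        rw [show pvBody (PySem.Dict.mk [("TpA", a), ("ApT", b), ("CpA", c), ("TpG", e), ("ApC", f), ("GpT", g)]) ['A', 'T']
              = PySem.Dict.mk [("TpA", a), ("ApT", b + 1), ("CpA", c), ("TpG", e), ("ApC", f), ("GpT", g)] from rfl, ih]
        simp
        try omega
      · by_cases h3 : u = 'C' ∧ v = 'A'
        · obtain ⟨rfl, rfl⟩ := h3
          rw [show pvBody (PySem.Dict.mk [("TpA", a), ("ApT", b), ("CpA", c), ("TpG", e), ("ApC", f), ("GpT", g)]) ['C', 'A']
                = PySem.Dict.mk [("TpA", a), ("ApT", b), ("CpA", c + 1), ("TpG", e), ("ApC", f), ("GpT", g)] from rfl, ih]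
          simp
          try omega
        · by_cases h4 : u = 'T' ∧ v = 'G'
          · obtain ⟨rfl, rfl⟩ := h4
            rw [show pvBody (PySem.Dict.mk [("TpA", a), ("ApT", b), ("CpA", c), ("TpG", e), ("ApC", f), ("GpT", g)]) ['T', 'G']
                  = PySem.Dict.mk [("TpA", a), ("ApT", b), ("CpA", c), ("TpG", e + 1), ("ApC", f), ("GpT", g)] from rfl, ih]
            simp
            try omega
          · by_cases h5 : u = 'A' ∧ v = 'C'
            · obtain ⟨rfl, rfl⟩ := h5
              rw [show pvBody (PySem.Dict.mk [("TpA", a), ("ApT", b), ("CpA", c), ("TpG", e), ("ApC", f), ("GpT", g)]) ['A', 'C']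
                    = PySem.Dict.mk [("TpA", a), ("ApT", b), ("CpA", c), ("TpG", e), ("ApC", f + 1), ("GpT", g)] from rfl, ih]
              simp
              try omega
            · by_cases h6 : u = 'G' ∧ v = 'T'
              · obtain ⟨rfl, rfl⟩ := h6
                rw [show pvBody (PySem.Dict.mk [("TpA", a), ("ApT", b), ("CpA", c), ("TpG", e), ("ApC", f), ("GpT", g)]) ['G', 'T']
                      = PySem.Dict.mk [("TpA", a), ("ApT", b), ("CpA", c), ("TpG", e), ("ApC", f), ("GpT", g + 1)] from rfl, ih]
                simp
                try omega
              · have pairneg : forall (x y : Char), ¬(u = x ∧ v = y) -> ¬(([u, v] : List Char) = [x, y]) := by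
                  intro x y h hh
                  injection hh with ha rest
                  injection rest with hb _
                  exact h ⟨ha, hb⟩
                have hz : pvBody (PySem.Dict.mk [("TpA", a), ("ApT", b), ("CpA", c), ("TpG", e), ("ApC", f), ("GpT", g)]) [u, v] = PySem.Dict.mk [("TpA", a), ("ApT", b), ("CpA", c), ("TpG", e), ("ApC", f), ("GpT", g)] := by
                  simp only [pvBody]
                  rw [if_neg (pairneg 'T' 'A' h1), if_neg (pairneg 'A' 'T' h2), if_neg (pairneg 'C' 'A' h3),
                      if_neg (pairneg 'T' 'G' h4), if_neg (pairneg 'A' 'C' h5), if_neg (pairneg 'G' 'T' h6)]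
                rw [hz, ih]
                simp [List.count_cons]
                exact ⟨fun hu hv => h1 ⟨hu, hv⟩, fun hu hv => h2 ⟨hu, hv⟩, fun hu hv => h3 ⟨hu, hv⟩,
                       fun hu hv => h4 ⟨hu, hv⟩, fun hu hv => h5 ⟨hu, hv⟩, fun hu hv => h6 ⟨hu, hv⟩⟩

theorem pv_key (cs : List Char) :
    ((PySem.List.pyRange 0 ((cs.length : Int) - 1) 1).foldl
        (fun s i => pvBody s (PySem.List.slice cs (some i) (some (i + 2))))
        (PySem.Dict.ofList [("TpA", 0), ("ApT", 0), ("CpA", 0), ("TpG", 0), ("ApC", 0), ("GpT", 0)])).items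
      = [("TpA", (PySem.List.count (cs.zip (PySem.List.slice cs (some 1) none)) ('T','A') : Int)),
         ("ApT", (PySem.List.count (cs.zip (PySem.List.slice cs (some 1) none)) ('A','T') : Int)),
         ("CpA", (PySem.List.count (cs.zip (PySem.List.slice cs (some 1) none)) ('C','A') : Int)),
         ("TpG", (PySem.List.count (cs.zip (PySem.List.slice cs (some 1) none)) ('T','G') : Int)),
         ("ApC", (PySem.List.count (cs.zip (PySem.List.slice cs (some 1) none)) ('A','C') : Int)),
         ("GpT", (PySem.List.count (cs.zip (PySem.List.slice cs (some 1) none)) ('G','T') : Int))] := by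
  rw [pv_range_to_zip pvBody cs,
      show (PySem.Dict.ofList [("TpA", (0:Int)), ("ApT", 0), ("CpA", 0), ("TpG", 0), ("ApC", 0), ("GpT", 0)] : PySem.Dict String Int) = PySem.Dict.mk [("TpA", 0), ("ApT", 0), ("CpA", 0), ("TpG", 0), ("ApC", 0), ("GpT", 0)] from rfl,
      pv_items]
  simp [PySem.List.slice_from_one, PySem.List.count_eq]

-- ===== VERDICT (by name: the statement is the Claim_ definition above) =====
theorem calculate_dinucleotide_frequency_spec : Claim_equal_calculate_dinucleotide_frequency := by
  intro s _
  unfold Spec_calculate_dinucleotide_frequency calculate_dinucleotide_frequency calculate_dinucleotide_frequency_alt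
  exact pv_key (PySem.Chars.replace (PySem.Chars.upper s.toList) "-".toList "".toList)
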